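-- pv_equiv track=rewrite | github.com/piaw/google-gtags | etags_to_tags.py | string_lisp_repr
-- ===== SOURCE A (Python) =====
-- def string_lisp_repr(string):
--   """
--   Prints a string as a lisp-readable string literal surrounded by
--   double quotes. (Python's repr would do the job, except it likes to
--   use single quotes and therefore won't escape double quotes.)
--   """
--   retval = '"'
--   for c in string:
--     if c != '\0':
--       if c == '\\' or c == '"':
--         retval += '\\'
--       retval += c
--     else:
--       # Just ignore strings which contain null's.
--       # It may be good to output a warning here.
--       return '""'
--   retval += '"'
--   return retval
-- ===== SOURCE B (Python) =====
-- def string_lisp_repr(string):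
--   """
--   Prints a string as a lisp-readable string literal surrounded by
--   double quotes.
--   """
--   if '\0' in string:
--     # Ignore strings which contain nulls (same as the original).
--     return '""'
--   return '"' + string.replace('\\', '\\\\').replace('"', '\\"') + '"'
-- ===== Notes on version B (the rewrite author's own statement) =====
-- stated objective: idiomatic
-- what changed: Replaces the char-by-char accumulator loop with interleaved null/escape branching by a separate membership scan for nulls followed by two chained library str.replace calls (backslash first, then double quote). B runs in C-level library code instead of a per-character Python loop with repeated string concatenation.
import Mathlib
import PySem

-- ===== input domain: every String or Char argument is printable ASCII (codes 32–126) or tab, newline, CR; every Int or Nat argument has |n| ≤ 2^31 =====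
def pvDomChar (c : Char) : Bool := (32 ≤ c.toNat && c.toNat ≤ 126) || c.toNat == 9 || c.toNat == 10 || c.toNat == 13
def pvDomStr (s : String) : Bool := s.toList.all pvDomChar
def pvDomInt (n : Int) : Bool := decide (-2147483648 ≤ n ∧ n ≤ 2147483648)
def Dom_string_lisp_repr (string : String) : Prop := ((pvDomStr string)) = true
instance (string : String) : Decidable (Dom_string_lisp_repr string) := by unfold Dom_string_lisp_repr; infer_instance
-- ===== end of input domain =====

-- B replaces A's char-by-char escape loop by a null membership scan plus two chained str.replace calls (idiomatic; return value only).


-- ===== PORT A =====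
-- retval accumulated as a List Char; early return '""' on a null char
def slrGo : List Char → List Char → String
  | acc, [] => String.ofList (acc ++ ['"'])
  | acc, c :: cs =>
    if c ≠ Char.ofNat 0 then
      slrGo (acc ++ (if c = '\\' ∨ c = '"' then ['\\'] else []) ++ [c]) cs
    else "\"\""

def string_lisp_repr (string : String) : String := slrGo ['"'] string.toList

-- ===== PORT B =====
def string_lisp_repr_alt (string : String) : String :=
  if PySem.Str.isIn "\x00" string then "\"\""
  else "\"" ++ PySem.Str.replace (PySem.Str.replace string "\\" "\\\\") "\"" "\\\"" ++ "\""

-- ===== PRECONDITION & SPEC =====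
def Spec_string_lisp_repr (string : String) (out : String) : Prop := out = string_lisp_repr_alt string
instance (string : String) (out : String) : Decidable (Spec_string_lisp_repr string out) := by unfold Spec_string_lisp_repr; infer_instance

-- ===== CLAIM (what is proved, stated in full; the proofs are below) =====
def Claim_equal_string_lisp_repr : Prop := ∀ (string : String), Dom_string_lisp_repr string → Spec_string_lisp_repr string (string_lisp_repr string)

-- ===== LEMMAS AND PROOFS =====

-- single-char-pattern replace is a flatMap
theorem replace_go_single (p : Char) (new : List Char) :
    ∀ (l : List Char) (fuel : Nat) (acc : List Char), l.length ≤ fuel →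
      PySem.Chars.replace.go [p] new fuel l acc
        = acc.reverse ++ l.flatMap (fun c => if c = p then new else [c]) := by
  intro l
  induction l with
  | nil => intro fuel acc _; cases fuel <;> simp [PySem.Chars.replace.go]
  | cons c t ih =>
    intro fuel acc hle
    cases fuel with
    | zero => simp at hle
    | succ fuel =>
      rw [PySem.Chars.replace.go]
      by_cases hc : c = p
      · subst hc
        simp only [List.isPrefixOf, beq_self_eq_true, Bool.true_and,
          if_pos, List.length_cons, List.length_nil, List.drop_succ_cons, List.drop_zero]
        rw [ih fuel _ (by simpa using hle)]
        simp
      · have : List.isPrefixOf [p] (c :: t) = false := by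
          simp [List.isPrefixOf]; exact fun h => absurd h.symm hc
        rw [this]
        simp only [Bool.false_eq_true, if_false]
        rw [ih fuel _ (by simpa using hle)]
        simp [hc]

theorem replace_single (cs : List Char) (p : Char) (new : List Char) :
    PySem.Chars.replace cs [p] new
      = cs.flatMap (fun c => if c = p then new else [c]) := by
  unfold PySem.Chars.replace
  simp only [List.isEmpty_cons, Bool.false_eq_true, if_false]
  exact replace_go_single p new cs cs.length [] le_rfl

def escChar (c : Char) : List Char :=
  if c = '\\' then ['\\', '\\'] else if c = '"' then ['\\', '"'] else [c]

-- the two chained replaces compose to the combined escape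
theorem flatMap_compose (l : List Char) :
    (l.flatMap (fun c => if c = '\\' then ['\\', '\\'] else [c])).flatMap
        (fun c => if c = '"' then ['\\', '"'] else [c])
      = l.flatMap escChar := by
  induction l with
  | nil => rfl
  | cons c t ih =>
    by_cases h1 : c = '\\'
    · subst h1; simp [escChar, ih]
    · by_cases h2 : c = '"'
      · subst h2; simp [escChar, ih]
      · simp [escChar, h1, h2, ih]

-- A's loop on a null-free list
theorem slrGo_eq (l : List Char) :
    ∀ acc, (∀ c ∈ l, c ≠ Char.ofNat 0) →
      slrGo acc l = String.ofList (acc ++ l.flatMap escChar ++ ['"']) := by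
  induction l with
  | nil => intro acc _; simp [slrGo]
  | cons c t ih =>
    intro acc h
    have hc : c ≠ Char.ofNat 0 := h c (List.mem_cons_self ..)
    rw [slrGo, if_pos hc, ih _ (fun x hx => h x (List.mem_cons_of_mem _ hx))]
    by_cases h1 : c = '\\'
    · subst h1; simp [escChar]
    · by_cases h2 : c = '"'
      · subst h2; simp [escChar]
      · simp [escChar, h1, h2]

theorem dom_no_null (s : String) (h : Dom_string_lisp_repr s) :
    ∀ c ∈ s.toList, c ≠ Char.ofNat 0 := by
  intro c hc
  have := List.all_eq_true.mp h c hc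
  intro hz
  subst hz
  simp [pvDomChar, Char.toNat] at this

theorem isIn_null_false (s : String) (h : Dom_string_lisp_repr s) :
    PySem.Str.isIn "\x00" s = false := by
  rw [PySem.Str.isIn_eq, PySem.Chars.isIn_eq_false_iff]
  intro hinf
  have h0 : '\x00' ∈ ("\x00" : String).toList := by decide
  exact dom_no_null s h _ (hinf.subset h0) (by decide)

-- ===== VERDICT (by name: the statement is the Claim_ definition above) =====
theorem string_lisp_repr_spec : Claim_equal_string_lisp_repr := by
  intro s hdom
  unfold Spec_string_lisp_repr string_lisp_repr string_lisp_repr_alt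
  rw [isIn_null_false s hdom]
  simp only [Bool.false_eq_true, if_false]
  rw [slrGo_eq s.toList ['"'] (dom_no_null s hdom)]
  apply String.ext
  -- compare the underlying char lists
  simp [PySem.Str.toList_replace, replace_single, flatMap_compose, String.toList_ofList]
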